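-- pv_equiv track=rewrite | github.com/jgreenwd/Python | Ch9.py | consecutive_double_letters
-- ===== SOURCE A (Python) =====
-- def consecutive_double_letters(word):
--   start_indexes_of_doubles = []
--
--   for index, letter in enumerate(word):
--     if index < len(word) - 1 and letter == word[index + 1]:
--       start_indexes_of_doubles.append(index)
--
--   consecutives = 1
--   counter = 1
--   while counter < len(start_indexes_of_doubles):
--     if start_indexes_of_doubles[counter - 1] + 2 == start_indexes_of_doubles[counter]:
--       consecutives += 1
--     counter += 1
--
--   return consecutives
-- ===== SOURCE B (Python) =====
-- def consecutive_double_letters(word):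
--     consecutives = 1
--     prev = None
--     for i, (x, y) in enumerate(zip(word, word[1:])):
--         if x == y:
--             if prev is not None and prev + 2 == i:
--                 consecutives += 1
--             prev = i
--     return consecutives
-- ===== Notes on version B (the rewrite author's own statement) =====
-- stated objective: simpler
-- what changed: A builds an intermediate list of double-start indices and then rescans that list with a counter; B fuses the two passes into one loop over the adjacent letter pairs, carrying only the previous double's index and the running count (no intermediate list, no repeated indexing).
import Mathlib
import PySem

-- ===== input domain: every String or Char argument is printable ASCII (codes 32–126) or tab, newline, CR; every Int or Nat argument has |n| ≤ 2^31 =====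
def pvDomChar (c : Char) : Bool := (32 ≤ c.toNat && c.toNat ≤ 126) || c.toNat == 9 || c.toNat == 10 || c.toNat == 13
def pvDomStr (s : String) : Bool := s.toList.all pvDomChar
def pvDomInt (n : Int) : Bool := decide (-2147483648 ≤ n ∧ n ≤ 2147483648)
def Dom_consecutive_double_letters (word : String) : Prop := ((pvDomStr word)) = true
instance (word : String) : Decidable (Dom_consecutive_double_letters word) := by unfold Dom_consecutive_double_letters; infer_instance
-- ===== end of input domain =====

-- B fuses A's two passes (build the list of double-start indices, then rescan it) into one
-- loop over the letter pairs carrying only the previous double's index — objective: simpler.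

-- ===== PORT A =====
def consecutive_double_letters (word : String) : Int :=
  let cs := word.toList
  let start_indexes_of_doubles :=
    (PySem.List.enumerate cs).foldl
      (fun acc p =>
        if p.1 < PySem.Chars.len cs - 1 ∧ PySem.Chars.pyGet? cs (p.1 + 1) = some p.2
        then acc ++ [p.1] else acc) []
  (PySem.List.pyRange 1 (PySem.List.len start_indexes_of_doubles)).foldl
    (fun consecutives counter =>
      if PySem.List.pyGetD start_indexes_of_doubles (counter - 1) 0 + 2
         = PySem.List.pyGetD start_indexes_of_doubles counter 0
      then consecutives + 1 else consecutives) 1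

-- ===== PORT B =====
def consecutive_double_letters_alt (word : String) : Int :=
  let cs := word.toList
  let res :=
    (PySem.List.enumerate (List.zip cs (PySem.Chars.slice cs (some 1) none))).foldl
      (fun (st : Option Int × Int) p =>
        if p.2.1 = p.2.2 then
          (some p.1,
           match st.1 with
           | some prev => if prev + 2 = p.1 then st.2 + 1 else st.2
           | none => st.2)
        else st) (none, 1)
  res.2

-- ===== PRECONDITION & SPEC =====
def Spec_consecutive_double_letters (word : String) (out : Int) : Prop := out = consecutive_double_letters_alt word
instance (word : String) (out : Int) : Decidable (Spec_consecutive_double_letters word out) := by unfold Spec_consecutive_double_letters; infer_instance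

-- ===== CLAIM (what is proved, stated in full; the proofs are below) =====
def Claim_equal_consecutive_double_letters : Prop := ∀ (word : String), Dom_consecutive_double_letters word → Spec_consecutive_double_letters word (consecutive_double_letters word)

-- ===== LEMMAS AND PROOFS =====

-- 1 where the previous double started two positions back, else 0
def pvInd (p : Option Int) (i : Int) : Int :=
  match p with
  | some j => if j + 2 = i then 1 else 0
  | none => 0

-- number of adjacent gap-2 pairs in the index list, seeded with an optional previous index
def pvAdj : Option Int → List Int → Int
  | _, [] => 0
  | p, i :: rest => pvInd p i + pvAdj (some i) rest

-- the common filter both sides produce: indices of equal letter pairs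
def pvFilt (ps : List (Int × (Char × Char))) : List Int :=
  ps.filterMap (fun q => if q.2.1 = q.2.2 then some q.1 else none)

def pvLastO (p : Option Int) (l : List Int) : Option Int :=
  match l with
  | [] => p
  | i :: rest => pvLastO (some i) rest

lemma B_fold (ps : List (Int × (Char × Char))) (p : Option Int) (c : Int) :
    ps.foldl
      (fun (st : Option Int × Int) p =>
        if p.2.1 = p.2.2 then
          (some p.1,
           match st.1 with
           | some prev => if prev + 2 = p.1 then st.2 + 1 else st.2
           | none => st.2)
        else st) (p, c)
    = (pvLastO p (pvFilt ps), c + pvAdj p (pvFilt ps)) := by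
  induction ps generalizing p c with
  | nil => simp [pvFilt, pvLastO, pvAdj]
  | cons q ps ih =>
    by_cases h : q.2.1 = q.2.2
    · simp only [List.foldl_cons, pvFilt, List.filterMap_cons, h, reduceIte]
      rw [ih]
      cases p with
      | none => simp [pvFilt, pvLastO, pvAdj, pvInd]
      | some j =>
        by_cases h2 : j + 2 = q.1 <;> simp [pvFilt, pvLastO, pvAdj, pvInd, h2] <;> ring
    · simp only [List.foldl_cons, pvFilt, List.filterMap_cons, h, reduceIte]
      rw [ih]; rfl

lemma zip_fold (L : List Int) (j c : Int) :
    (List.zip (j :: L) L).foldl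
      (fun cons q => if q.1 + 2 = q.2 then cons + 1 else cons) c
    = c + pvAdj (some j) L := by
  induction L generalizing j c with
  | nil => simp [pvAdj]
  | cons i rest ih =>
    simp only [List.zip_cons_cons, List.foldl_cons, pvAdj, pvInd]
    rw [ih]
    by_cases h : j + 2 = i <;> simp [h] <;> ring

lemma map_range_eq_zip (L : List Int) :
    (PySem.List.pyRange 1 (PySem.List.len L)).map
      (fun c => (PySem.List.pyGetD L (c - 1) 0, PySem.List.pyGetD L c 0))
    = List.zip L L.tail := by
  apply List.ext_getElem
  · simp only [List.length_map, PySem.List.length_pyRange_one, List.length_zip,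
      List.length_tail, PySem.List.len]
    omega
  · intro k h1 h2
    have hk : k + 1 < L.length := by
      simp [PySem.List.length_pyRange_one, PySem.List.len] at h1
      omega
    simp only [List.getElem_map, PySem.List.getElem_pyRange_one, List.getElem_zip,
      List.getElem_tail]
    have e1 : (1 : Int) + (k : Int) - 1 = ((k : Nat) : Int) := by ring
    have e2 : (1 : Int) + (k : Int) = (((k + 1 : Nat)) : Int) := by push_cast; ring
    rw [e1, e2, PySem.List.pyGetD_natCast, PySem.List.pyGetD_natCast]
    congr 1 <;> [rw [List.getD_eq_getElem _ _ (by omega)]; rw [List.getD_eq_getElem _ _ hk]]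

lemma range_fold_eq (L : List Int) :
    (PySem.List.pyRange 1 (PySem.List.len L)).foldl
      (fun consecutives counter =>
        if PySem.List.pyGetD L (counter - 1) 0 + 2 = PySem.List.pyGetD L counter 0
        then consecutives + 1 else consecutives) 1
    = 1 + pvAdj none L := by
  have h := List.foldl_map (f := fun c => (PySem.List.pyGetD L (c - 1) 0, PySem.List.pyGetD L c 0))
    (g := fun cons (q : Int × Int) => if q.1 + 2 = q.2 then cons + 1 else cons)
    (l := PySem.List.pyRange 1 (PySem.List.len L)) (init := (1 : Int))
  rw [map_range_eq_zip] at h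
  rw [← h]
  cases L with
  | nil => simp [pvAdj]
  | cons j rest => rw [List.tail_cons, zip_fold]; simp [pvAdj, pvInd]

-- the index list A builds equals the filtered enumerated pair list B walks
lemma filt_eq (cs : List Char) :
    ((PySem.List.enumerate cs).filter
      (fun p => decide (p.1 < PySem.Chars.len cs - 1 ∧ PySem.Chars.pyGet? cs (p.1 + 1) = some p.2))).map (·.1)
    = pvFilt (PySem.List.enumerate (List.zip cs cs.tail)) := by
  rw [PySem.List.enumerate_eq_map_pyRange cs 'a',
      PySem.List.enumerate_eq_map_pyRange (List.zip cs cs.tail) ('a', 'a')]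
  rw [List.filter_map, List.map_map]
  unfold pvFilt
  rw [List.filterMap_map]
  have hguard : ((fun q : Int × Char × Char => if q.2.1 = q.2.2 then some q.1 else none) ∘
      (fun j => (j, PySem.List.pyGetD (List.zip cs cs.tail) j ('a', 'a'))))
      = Option.guard (fun j => decide ((PySem.List.pyGetD (List.zip cs cs.tail) j ('a', 'a')).1
          = (PySem.List.pyGetD (List.zip cs cs.tail) j ('a', 'a')).2)) := by
    funext j
    simp [Option.guard]
  rw [hguard, List.filterMap_eq_filter]
  have hmapid : ((fun p : Int × Char => p.1) ∘ (fun j => (j, PySem.List.pyGetD cs j 'a')))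
      = fun j => j := rfl
  rw [hmapid, List.map_id']
  rcases List.eq_nil_or_concat' cs with hcs | ⟨cs', cl, hcs⟩
  · subst hcs; simp [PySem.List.pyRange_one_eq_nil]
  have hn : 1 ≤ cs.length := by subst hcs; simp
  have hlen : PySem.List.len cs = ((cs.length - 1 : Nat) : Int) + 1 := by
    simp [PySem.List.len]; omega
  have hzlen : PySem.List.len (List.zip cs cs.tail) = ((cs.length - 1 : Nat) : Int) := by
    simp [PySem.List.len]
  rw [hlen, hzlen, PySem.List.pyRange_one_succ_right (by positivity), List.filter_append]
  have hfa : ((fun p : Int × Char => decide (p.1 < PySem.Chars.len cs - 1 ∧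
      PySem.Chars.pyGet? cs (p.1 + 1) = some p.2)) ∘
      (fun j : Int => (j, PySem.List.pyGetD cs j 'a'))) ((cs.length - 1 : Nat) : Int) = false := by
    simp only [Function.comp_apply, decide_eq_false_iff_not, not_and, PySem.Chars.len]
    intro h
    exfalso
    omega
  rw [List.filter_singleton, hfa]
  simp only [Bool.cond_false, List.append_nil]
  apply List.filter_congr
  intro j hj
  rw [PySem.List.mem_pyRange_one] at hj
  obtain ⟨hj0, hj1⟩ := hj
  obtain ⟨k, rfl⟩ : ∃ k : Nat, j = (k : Int) := ⟨j.toNat, by omega⟩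
  have hklt : k + 1 < cs.length := by omega
  have hkz : k < (List.zip cs cs.tail).length := by
    simp [List.length_zip]; omega
  simp only [Function.comp_apply]
  have e2 : (k : Int) + 1 = ((k + 1 : Nat) : Int) := by push_cast; ring
  rw [e2]
  simp only [PySem.List.pyGetD_natCast, PySem.Chars.pyGet?, PySem.List.pyGet?_natCast]
  rw [List.getD_eq_getElem _ _ (by omega), List.getD_eq_getElem _ _ hkz,
      List.getElem?_eq_getElem hklt]
  simp only [List.getElem_zip, List.getElem_tail]
  apply decide_eq_decide.mpr
  constructor
  · rintro ⟨-, h⟩; exact (Option.some_inj.mp h).symm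
  · intro h
    refine ⟨?_, by rw [h]⟩
    simp [PySem.Chars.len]; omega

theorem consecutive_double_letters_spec : Claim_equal_consecutive_double_letters := by
  intro word _
  unfold Spec_consecutive_double_letters consecutive_double_letters consecutive_double_letters_alt
  simp only []  -- ζ-reduce the ports' `let` bindings
  have hslice : PySem.Chars.slice word.toList (some 1) none = word.toList.tail :=
    PySem.List.slice_from_one word.toList
  rw [hslice, B_fold]
  have hfun : (fun (acc : List Int) (p : Int × Char) =>
        if p.1 < PySem.Chars.len word.toList - 1 ∧
            PySem.Chars.pyGet? word.toList (p.1 + 1) = some p.2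
        then acc ++ [p.1] else acc)
      = (fun (acc : List Int) (p : Int × Char) =>
        if (fun p : Int × Char => decide (p.1 < PySem.Chars.len word.toList - 1 ∧
            PySem.Chars.pyGet? word.toList (p.1 + 1) = some p.2)) p = true
        then acc ++ [(fun p : Int × Char => p.1) p] else acc) := by
    funext acc p
    simp
  rw [hfun, PySem.List.foldl_append_if, List.nil_append, range_fold_eq, filt_eq]
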